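-- pv_equiv track=rewrite | github.com/Team-Gabhrus/rakshak | rakshak/app/engine/pqc_classifier.py | classify_encryption
-- ===== SOURCE A (Python) =====
-- QUANTUM_SAFE_SYMMETRIC = {"AES-256-GCM", "AES-256-CBC", "AES-256", "CHACHA20-POLY1305", "ChaCha20-Poly1305"}
--
-- NOT_SAFE_SYMMETRIC = {"AES-128-GCM", "AES-128-CBC", "AES-128", "3DES", "DES", "RC4"}
--
-- def classify_encryption(enc: str) -> str:
--     """Returns: 'safe', 'weak', 'unknown'"""
--     enc_upper = enc.upper().replace("-", "_").replace(" ", "_")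
--     for safe in QUANTUM_SAFE_SYMMETRIC:
--         if safe.upper().replace("-", "_") in enc_upper:
--             return "safe"
--     for weak in NOT_SAFE_SYMMETRIC:
--         if weak.upper().replace("-", "_") in enc_upper:
--             return "weak"
--     return "unknown"
-- ===== SOURCE B (Python) =====
-- # One left-to-right scan of the normalized string with a weak-seen flag,
-- # against precomputed normalized pattern tuples (redundant patterns folded
-- # into the substrings that subsume them: AES_256* -> AES_256, 3DES -> DES).
-- _SAFE = ("AES_256", "CHACHA20_POLY1305")
-- _WEAK = ("AES_128", "DES", "RC4")
--
-- def classify_encryption(enc: str) -> str: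
--     e = enc.upper().replace("-", "_").replace(" ", "_")
--     weak_seen = False
--     for i in range(len(e)):
--         if any(e.startswith(p, i) for p in _SAFE):
--             return "safe"
--         if not weak_seen and any(e.startswith(p, i) for p in _WEAK):
--             weak_seen = True
--     return "weak" if weak_seen else "unknown"
-- ===== Notes on version B (the rewrite author's own statement) =====
-- stated objective: alternative
-- what changed: Replaces A's two pattern-set loops of whole-string substring tests (normalizing each pattern on every call) with a single left-to-right position scan of the normalized string that checks precomputed minimal normalized patterns via startswith, carrying a weak-seen flag and returning the safe verdict immediately on a safe-pattern match.
import Mathlib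
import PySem

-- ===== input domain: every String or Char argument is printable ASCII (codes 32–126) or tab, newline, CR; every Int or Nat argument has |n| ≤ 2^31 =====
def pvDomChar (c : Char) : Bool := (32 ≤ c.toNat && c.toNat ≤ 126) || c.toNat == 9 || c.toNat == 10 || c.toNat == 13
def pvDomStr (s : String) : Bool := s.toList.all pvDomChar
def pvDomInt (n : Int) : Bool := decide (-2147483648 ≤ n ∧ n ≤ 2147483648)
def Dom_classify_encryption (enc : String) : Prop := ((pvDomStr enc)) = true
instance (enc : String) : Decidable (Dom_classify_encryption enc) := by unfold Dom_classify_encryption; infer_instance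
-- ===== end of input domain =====

-- B replaces A's two pattern-set membership loops by one position scan with a
-- weak-seen flag over precomputed minimal normalized patterns (alternative, not faster).


-- ===== PORT A =====
-- Python set literals; each holds distinct strings, kept in insertion order.
def QUANTUM_SAFE_SYMMETRIC : List String :=
  PySem.Set.ofList ["AES-256-GCM", "AES-256-CBC", "AES-256", "CHACHA20-POLY1305", "ChaCha20-Poly1305"]

def NOT_SAFE_SYMMETRIC : List String :=
  PySem.Set.ofList ["AES-128-GCM", "AES-128-CBC", "AES-128", "3DES", "DES", "RC4"]

-- the 'for … return' loops: first loop returning "safe" on a hit, then the weak loop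
def classify_encryption (enc : String) : String :=
  let encUpper := PySem.Str.replace (PySem.Str.replace (PySem.Str.upper enc) "-" "_") " " "_"
  if QUANTUM_SAFE_SYMMETRIC.any
      (fun safe => PySem.Str.isIn (PySem.Str.replace (PySem.Str.upper safe) "-" "_") encUpper) then
    "safe"
  else if NOT_SAFE_SYMMETRIC.any
      (fun weak => PySem.Str.isIn (PySem.Str.replace (PySem.Str.upper weak) "-" "_") encUpper) then
    "weak"
  else
    "unknown"

-- ===== PORT B =====
def pvSafePats : List (List Char) := ["AES_256".toList, "CHACHA20_POLY1305".toList]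
def pvWeakPats : List (List Char) := ["AES_128".toList, "DES".toList, "RC4".toList]

-- Source B's 'for i in range(len(e))' scan: e.startswith(p, i) is startswith on the tail e[i:]
def pvScan (cs : List Char) (weakSeen : Bool) : String :=
  match cs with
  | [] => if weakSeen then "weak" else "unknown"
  | c :: rest =>
    if pvSafePats.any (fun p => PySem.Chars.startswith (c :: rest) p) then "safe"
    else
      let weakSeen' :=
        if !weakSeen && pvWeakPats.any (fun p => PySem.Chars.startswith (c :: rest) p) then true
        else weakSeen
      pvScan rest weakSeen'

def classify_encryption_alt (enc : String) : String :=
  let e := PySem.Str.replace (PySem.Str.replace (PySem.Str.upper enc) "-" "_") " " "_"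
  pvScan e.toList false

-- ===== PRECONDITION & SPEC =====
def Spec_classify_encryption (enc : String) (out : String) : Prop := out = classify_encryption_alt enc
instance (enc : String) (out : String) : Decidable (Spec_classify_encryption enc out) := by unfold Spec_classify_encryption; infer_instance

-- ===== CLAIM (what is proved, stated in full; the proofs are below) =====
def Claim_equal_classify_encryption : Prop := ∀ (enc : String), Dom_classify_encryption enc → Spec_classify_encryption enc (classify_encryption enc)

-- ===== LEMMAS AND PROOFS =====

-- closed form of B's scan: safe wins if any safe pattern is an infix, else weak flag / weak infix
theorem pvIsIn_cons (p : List Char) (c : Char) (rest : List Char) :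
    PySem.Chars.isIn p (c :: rest) = (PySem.Chars.startswith (c :: rest) p || PySem.Chars.isIn p rest) := by
  by_cases h : p <:+: c :: rest
  · have hl : PySem.Chars.isIn p (c :: rest) = true := (PySem.Chars.isIn_iff_infix _ _).mpr h
    rcases List.infix_cons_iff.mp h with hp | hi
    · simp [hl, (PySem.Chars.startswith_iff _ _).mpr hp]
    · simp [hl, (PySem.Chars.isIn_iff_infix _ _).mpr hi]
  · have h1 : PySem.Chars.isIn p (c :: rest) = false := (PySem.Chars.isIn_eq_false_iff _ _).mpr h
    have h2 : PySem.Chars.isIn p rest = false :=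
      (PySem.Chars.isIn_eq_false_iff _ _).mpr (fun hi => h (List.infix_cons_iff.mpr (Or.inr hi)))
    have h3 : PySem.Chars.startswith (c :: rest) p = false := by
      by_contra hne
      exact h (List.infix_cons_iff.mpr (Or.inl ((PySem.Chars.startswith_iff _ _).mp (Bool.of_not_eq_false hne))))
    simp [h1, h2, h3]

theorem pvAny_or {α : Type} (l : List α) (p q : α → Bool) :
    (l.any fun x => p x || q x) = (l.any p || l.any q) := by
  induction l with
  | nil => rfl
  | cons x xs ih => simp [List.any_cons, ih, Bool.or_assoc, Bool.or_left_comm]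

theorem pvScan_eq (cs : List Char) (w : Bool) :
    pvScan cs w =
      if pvSafePats.any (fun p => PySem.Chars.isIn p cs) then "safe"
      else if w || pvWeakPats.any (fun p => PySem.Chars.isIn p cs) then "weak"
      else "unknown" := by
  induction cs generalizing w with
  | nil => cases w <;> rfl
  | cons c rest ih =>
    rw [pvScan, ih]
    simp only [pvIsIn_cons, pvAny_or]
    cases h1 : pvSafePats.any (fun p => PySem.Chars.startswith (c :: rest) p) <;>
    cases h2 : pvSafePats.any (fun p => PySem.Chars.isIn p rest) <;>
    cases h3 : pvWeakPats.any (fun p => PySem.Chars.startswith (c :: rest) p) <;>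
    cases h4 : pvWeakPats.any (fun p => PySem.Chars.isIn p rest) <;>
    cases w <;> simp_all

-- an infix of a string is an infix when a prefix pattern of it is, e.g. AES_256 inside AES_256_GCM
theorem pvInfix_mono (p q cs : List Char) (hpq : p <+: q) (h : q <:+: cs) : p <:+: cs :=
  List.IsInfix.trans (List.IsPrefix.isInfix hpq) h

set_option maxHeartbeats 1600000 in
theorem classify_encryption_eq_alt (enc : String) :
    classify_encryption enc = classify_encryption_alt enc := by
  unfold classify_encryption classify_encryption_alt QUANTUM_SAFE_SYMMETRIC NOT_SAFE_SYMMETRIC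
  rw [pvScan_eq]
  set e := PySem.Str.replace (PySem.Str.replace (PySem.Str.upper enc) "-" "_") " " "_" with he
  -- evaluate the set literals (all elements distinct) and the normalized pattern literals
  have hS : List.foldl PySem.Set.add PySem.Set.empty
      ["AES-256-GCM", "AES-256-CBC", "AES-256", "CHACHA20-POLY1305", "ChaCha20-Poly1305"] =
      ["AES-256-GCM", "AES-256-CBC", "AES-256", "CHACHA20-POLY1305", "ChaCha20-Poly1305"] := by rfl
  have hW : List.foldl PySem.Set.add PySem.Set.empty
      ["AES-128-GCM", "AES-128-CBC", "AES-128", "3DES", "DES", "RC4"] =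
      ["AES-128-GCM", "AES-128-CBC", "AES-128", "3DES", "DES", "RC4"] := by rfl
  rw [PySem.Set.ofList, PySem.Set.ofList, hS, hW]
  simp only [List.any_cons, List.any_nil, pvSafePats, pvWeakPats]
  have hnorm : ∀ s t : String, PySem.Str.replace (PySem.Str.upper s) "-" "_" = t →
      PySem.Str.isIn (PySem.Str.replace (PySem.Str.upper s) "-" "_") e = PySem.Chars.isIn t.toList e.toList := by
    intro s t hst; rw [hst]; simp [PySem.Str.isIn]
  simp only [hnorm "AES-256-GCM" "AES_256_GCM" (by rfl), hnorm "AES-256-CBC" "AES_256_CBC" (by rfl),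
      hnorm "AES-256" "AES_256" (by rfl), hnorm "CHACHA20-POLY1305" "CHACHA20_POLY1305" (by rfl),
      hnorm "ChaCha20-Poly1305" "CHACHA20_POLY1305" (by rfl), hnorm "AES-128-GCM" "AES_128_GCM" (by rfl),
      hnorm "AES-128-CBC" "AES_128_CBC" (by rfl), hnorm "AES-128" "AES_128" (by rfl),
      hnorm "3DES" "3DES" (by rfl), hnorm "DES" "DES" (by rfl), hnorm "RC4" "RC4" (by rfl)]
  -- subsumption: longer patterns imply their substring patterns
  have sub : ∀ p q : String, p.toList <+: q.toList →
      PySem.Chars.isIn q.toList e.toList = true → PySem.Chars.isIn p.toList e.toList = true := by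
    intro p q hpq h
    exact (PySem.Chars.isIn_iff_infix _ _).mpr (pvInfix_mono _ _ _ hpq ((PySem.Chars.isIn_iff_infix _ _).mp h))
  have sub3 : ∀ p q : String, p.toList <:+ q.toList →
      PySem.Chars.isIn q.toList e.toList = true → PySem.Chars.isIn p.toList e.toList = true := by
    intro p q hpq h
    exact (PySem.Chars.isIn_iff_infix _ _).mpr
      (List.IsInfix.trans (List.IsSuffix.isInfix hpq) ((PySem.Chars.isIn_iff_infix _ _).mp h))
  have hsafe : (PySem.Chars.isIn "AES_256_GCM".toList e.toList ||
        (PySem.Chars.isIn "AES_256_CBC".toList e.toList ||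
          (PySem.Chars.isIn "AES_256".toList e.toList ||
            (PySem.Chars.isIn "CHACHA20_POLY1305".toList e.toList ||
              (PySem.Chars.isIn "CHACHA20_POLY1305".toList e.toList || false))))) =
      (PySem.Chars.isIn "AES_256".toList e.toList ||
        (PySem.Chars.isIn "CHACHA20_POLY1305".toList e.toList || false)) := by
    have h1 := sub "AES_256" "AES_256_GCM" (by decide)
    have h2 := sub "AES_256" "AES_256_CBC" (by decide)
    rcases (PySem.Chars.isIn "AES_256_GCM".toList e.toList).eq_false_or_eq_true with hg|hg <;>
    rcases (PySem.Chars.isIn "AES_256_CBC".toList e.toList).eq_false_or_eq_true with hc|hc <;>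
    rcases (PySem.Chars.isIn "AES_256".toList e.toList).eq_false_or_eq_true with ha|ha <;>
    rcases (PySem.Chars.isIn "CHACHA20_POLY1305".toList e.toList).eq_false_or_eq_true with hp|hp <;>
    simp_all
  have hweak : (PySem.Chars.isIn "AES_128_GCM".toList e.toList ||
        (PySem.Chars.isIn "AES_128_CBC".toList e.toList ||
          (PySem.Chars.isIn "AES_128".toList e.toList ||
            (PySem.Chars.isIn "3DES".toList e.toList ||
              (PySem.Chars.isIn "DES".toList e.toList ||
                (PySem.Chars.isIn "RC4".toList e.toList || false)))))) =
      (PySem.Chars.isIn "AES_128".toList e.toList ||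
        (PySem.Chars.isIn "DES".toList e.toList ||
          (PySem.Chars.isIn "RC4".toList e.toList || false))) := by
    have h3 := sub "AES_128" "AES_128_GCM" (by decide)
    have h4 := sub "AES_128" "AES_128_CBC" (by decide)
    have h5 := sub3 "DES" "3DES" (by decide)
    rcases (PySem.Chars.isIn "AES_128_GCM".toList e.toList).eq_false_or_eq_true with hkg|hkg <;>
    rcases (PySem.Chars.isIn "AES_128_CBC".toList e.toList).eq_false_or_eq_true with hkc|hkc <;>
    rcases (PySem.Chars.isIn "AES_128".toList e.toList).eq_false_or_eq_true with hk|hk <;>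
    rcases (PySem.Chars.isIn "3DES".toList e.toList).eq_false_or_eq_true with h3d|h3d <;>
    rcases (PySem.Chars.isIn "DES".toList e.toList).eq_false_or_eq_true with hd|hd <;>
    rcases (PySem.Chars.isIn "RC4".toList e.toList).eq_false_or_eq_true with hr|hr <;>
    simp_all
  rw [hsafe, hweak]
  simp

-- ===== VERDICT (by name: the statement is the Claim_ definition above) =====
theorem classify_encryption_spec : Claim_equal_classify_encryption := by
  intro enc _
  exact classify_encryption_eq_alt enc
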